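-- pv_equiv track=rewrite | github.com/Yramklass/POL-ID | scripts/crop_pollen.py | group_stacks
-- ===== SOURCE A (Python) =====
-- def group_stacks(image_files):
--     """
--     Groups image filenames into stacks. A stack ends when a filename contains "box".
--     Assumes image_files are from a single taxon.
--     """
--     stacks = []
--     current_stack = []
--     # Sort files to ensure consistent stack grouping
--     sorted_image_files = sorted(image_files)
--
--     for fname in sorted_image_files:
--         if "box" in fname.lower(): # Assuming "box" marks the end of a distinct slide/stack
--             stacks.append(list(current_stack)) # Add a copy of the current stack
--             current_stack = [] # Reset for the next stack
--         else:
--             current_stack.append(fname)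
--
--     # Add any remaining files as the last stack if it's not empty
--     if current_stack:
--         stacks.append(list(current_stack))
--     return stacks
-- ===== SOURCE B (Python) =====
-- def group_stacks(image_files):
--     """
--     Groups image filenames into stacks. A stack ends when a filename contains "box".
--     Assumes image_files are from a single taxon.
--     """
--     files = sorted(image_files)
--     stacks = []
--     while True:
--         idx = next((i for i, f in enumerate(files) if "box" in f.lower()), None)
--         if idx is None:
--             if files:
--                 stacks.append(files)
--             return stacks
--         stacks.append(files[:idx])
--         files = files[idx + 1:]
-- ===== Notes on version B (the rewrite author's own statement) =====
-- stated objective: alternative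
-- what changed: Replaces A's element-by-element accumulator fold with a split-at-first-'box' loop: repeatedly find the index of the next 'box' filename in the sorted list and slice the stack off in one step.
import Mathlib
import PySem

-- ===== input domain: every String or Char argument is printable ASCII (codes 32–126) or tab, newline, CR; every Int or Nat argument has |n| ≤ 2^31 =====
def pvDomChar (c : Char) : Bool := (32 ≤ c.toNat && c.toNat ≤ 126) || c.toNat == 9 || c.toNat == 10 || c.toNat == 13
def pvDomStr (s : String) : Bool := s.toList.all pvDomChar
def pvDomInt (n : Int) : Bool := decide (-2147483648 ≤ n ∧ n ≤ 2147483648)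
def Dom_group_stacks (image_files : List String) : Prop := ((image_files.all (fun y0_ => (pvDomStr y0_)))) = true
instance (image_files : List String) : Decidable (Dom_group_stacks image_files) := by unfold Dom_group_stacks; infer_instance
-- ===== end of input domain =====

-- B replaces A's element-by-element accumulator fold with a split-at-first-"box" slicing loop; objective: alternative decomposition (same cost).

-- ===== PORT A =====
-- '"box" in fname.lower()' — the stack-terminator test shared verbatim by both Pythons
def pvIsBox (fname : String) : Bool := PySem.Str.isIn "box" (PySem.Str.lower fname)

def group_stacks (image_files : List String) : List (List String) :=
  let sorted_image_files := PySem.List.sorted image_files (fun x => x) false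
  let res := sorted_image_files.foldl
    (fun (st : List (List String) × List String) fname =>
      if pvIsBox fname then (st.1 ++ [st.2], [])
      else (st.1, st.2 ++ [fname]))
    ([], [])
  if res.2 ≠ [] then res.1 ++ [res.2] else res.1

-- ===== PORT B =====
-- the 'while True' loop of Source B: find the first "box" filename, slice the stack off, continue on the tail
def pvSplitLoop (acc : List (List String)) (files : List String) : List (List String) :=
  match h : files.findIdx? pvIsBox with
  | none => if files ≠ [] then acc ++ [files] else acc
  | some i => pvSplitLoop (acc ++ [files.take i]) (files.drop (i + 1))
termination_by files.length
decreasing_by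
  have := (List.findIdx?_eq_some_iff_getElem.mp h).1
  simp [List.length_drop]; omega

def group_stacks_alt (image_files : List String) : List (List String) :=
  pvSplitLoop [] (PySem.List.sorted image_files (fun x => x) false)

-- ===== PRECONDITION & SPEC =====
def Spec_group_stacks (image_files : List String) (out : List (List String)) : Prop := out = group_stacks_alt image_files
instance (image_files : List String) (out : List (List String)) : Decidable (Spec_group_stacks image_files out) := by unfold Spec_group_stacks; infer_instance

-- ===== CLAIM (what is proved, stated in full; the proofs are below) =====
def Claim_equal_group_stacks : Prop := ∀ (image_files : List String), Dom_group_stacks image_files → Spec_group_stacks image_files (group_stacks image_files)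

-- ===== LEMMAS AND PROOFS =====

-- proof-side pure (no-accumulator) version of B's loop
def pvSplit0 (files : List String) : List (List String) :=
  match h : files.findIdx? pvIsBox with
  | none => if files ≠ [] then [files] else []
  | some i => files.take i :: pvSplit0 (files.drop (i + 1))
termination_by files.length
decreasing_by
  have := (List.findIdx?_eq_some_iff_getElem.mp h).1
  simp [List.length_drop]; omega

-- proof-side recursive form of A's fold
def pvLoopA (cur : List String) : List String → List (List String)
  | [] => if cur ≠ [] then [cur] else []
  | f :: fs => if pvIsBox f then cur :: pvLoopA [] fs else pvLoopA (cur ++ [f]) fs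

-- prepend cur to the first group (creating it if needed and cur is nonempty)
def pvConsFirst (cur : List String) : List (List String) → List (List String)
  | [] => if cur ≠ [] then [cur] else []
  | g :: gs => (cur ++ g) :: gs

theorem pvSplitLoop_none {files : List String} (h : files.findIdx? pvIsBox = none)
    (acc : List (List String)) :
    pvSplitLoop acc files = if files ≠ [] then acc ++ [files] else acc := by
  rw [pvSplitLoop]; split <;> simp_all

theorem pvSplitLoop_some {files : List String} {i : Nat} (h : files.findIdx? pvIsBox = some i)
    (acc : List (List String)) :
    pvSplitLoop acc files = pvSplitLoop (acc ++ [files.take i]) (files.drop (i + 1)) := by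
  rw [pvSplitLoop]; split <;> simp_all

theorem pvSplit0_none {files : List String} (h : files.findIdx? pvIsBox = none) :
    pvSplit0 files = if files ≠ [] then [files] else [] := by
  rw [pvSplit0]; split <;> simp_all

theorem pvSplit0_some {files : List String} {i : Nat} (h : files.findIdx? pvIsBox = some i) :
    pvSplit0 files = files.take i :: pvSplit0 (files.drop (i + 1)) := by
  rw [pvSplit0]; split <;> simp_all

theorem pvSplitLoop_eq_append (files : List String) (acc : List (List String)) :
    pvSplitLoop acc files = acc ++ pvSplit0 files := by
  induction hn : files.length using Nat.strong_induction_on generalizing files acc with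
  | _ n ih =>
    cases h : files.findIdx? pvIsBox with
    | none =>
      rw [pvSplitLoop_none h, pvSplit0_none h]
      split <;> simp
    | some i =>
      have hi := (List.findIdx?_eq_some_iff_getElem.mp h).1
      rw [pvSplitLoop_some h, pvSplit0_some h,
        ih (files.drop (i + 1)).length (by simp [List.length_drop]; omega) _ _ rfl]
      simp

theorem pvConsFirst_nil (gs : List (List String)) : pvConsFirst [] gs = gs := by
  cases gs <;> simp [pvConsFirst]

theorem pvLoopA_eq_consFirst (files : List String) (cur : List String) :
    pvLoopA cur files = pvConsFirst cur (pvSplit0 files) := by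
  induction files generalizing cur with
  | nil => rw [pvSplit0_none (by simp)]; simp [pvLoopA, pvConsFirst]
  | cons f fs ih =>
    by_cases hb : pvIsBox f
    · have h : (f :: fs).findIdx? pvIsBox = some 0 := by
        rw [List.findIdx?_cons]; simp [hb]
      rw [pvSplit0_some h]
      simp only [pvLoopA, hb, if_pos, pvConsFirst, List.take_zero, List.drop_succ_cons,
        List.drop_zero, List.append_nil]
      rw [ih [], pvConsFirst_nil]
    · have hstep : pvLoopA cur (f :: fs) = pvLoopA (cur ++ [f]) fs := by
        simp [pvLoopA, hb]
      rw [hstep, ih]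
      cases h : fs.findIdx? pvIsBox with
      | none =>
        have h' : (f :: fs).findIdx? pvIsBox = none := by
          rw [List.findIdx?_cons]; simp [hb, h]
        rw [pvSplit0_none h, pvSplit0_none h']
        cases fs <;> simp [pvConsFirst]
      | some i =>
        have h' : (f :: fs).findIdx? pvIsBox = some (i + 1) := by
          rw [List.findIdx?_cons]; simp [hb, h]
        rw [pvSplit0_some h, pvSplit0_some h']
        simp [pvConsFirst]

theorem pvFoldA (fs : List String) (acc : List (List String)) (cur : List String) :
    (let res := fs.foldl
        (fun (st : List (List String) × List String) fname =>
          if pvIsBox fname then (st.1 ++ [st.2], [])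
          else (st.1, st.2 ++ [fname]))
        (acc, cur)
      if res.2 ≠ [] then res.1 ++ [res.2] else res.1)
      = acc ++ pvLoopA cur fs := by
  induction fs generalizing acc cur with
  | nil => simp [pvLoopA]; split <;> simp
  | cons f fs ih =>
    by_cases hb : pvIsBox f
    · simp only [List.foldl_cons, hb, if_pos, pvLoopA]
      rw [ih]; simp
    · simp only [List.foldl_cons, hb, pvLoopA, ite_false, Bool.false_eq_true]
      rw [ih]

-- ===== VERDICT (by name: the statement is the Claim_ definition above) =====
theorem group_stacks_spec : Claim_equal_group_stacks := by
  intro image_files _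
  show group_stacks image_files = group_stacks_alt image_files
  unfold group_stacks group_stacks_alt
  rw [pvFoldA, pvSplitLoop_eq_append, pvLoopA_eq_consFirst, pvConsFirst_nil]
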